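-- pv_equiv track=rewrite | github.com/TSPARR/hardcover_bookclub | bookclub/views/attribution_analytics.py | detect_sub_patterns
-- ===== SOURCE A (Python) =====
-- def detect_sub_patterns(sequence):
--     """Detect common sub-patterns in a sequence (pairs or triplets that repeat)."""
--     if len(sequence) < 4:  # Need at least 4 items to find meaningful sub-patterns
--         return {"pairs": [], "triplets": []}  # Return empty dict instead of empty list
--
--     # Look for pairs that appear multiple times
--     pairs = []
--     for i in range(len(sequence) - 1):
--         pair = (sequence[i], sequence[i + 1])
--         # Check if this pair appears elsewhere in the sequence
--         for j in range(i + 2, len(sequence) - 1):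
--             if sequence[j] == pair[0] and sequence[j + 1] == pair[1]:
--                 pairs.append(pair)
--                 break
--
--     # Look for triplets if sequence is long enough
--     triplets = []
--     if len(sequence) >= 6:
--         for i in range(len(sequence) - 2):
--             triplet = (sequence[i], sequence[i + 1], sequence[i + 2])
--             # Check if this triplet appears elsewhere
--             for j in range(i + 3, len(sequence) - 2):
--                 if (
--                     sequence[j] == triplet[0]
--                     and sequence[j + 1] == triplet[1]
--                     and sequence[j + 2] == triplet[2]
--                 ):
--                     triplets.append(triplet)
--                     break
--
--     return {"pairs": pairs, "triplets": triplets}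
-- ===== SOURCE B (Python) =====
-- def detect_sub_patterns(sequence):
--     """Detect common sub-patterns in a sequence (pairs or triplets that repeat)."""
--     n = len(sequence)
--     if n < 4:
--         return {"pairs": [], "triplets": []}
--
--     # Last start position of each 2-gram, built in one pass.
--     last2 = {}
--     for i in range(n - 1):
--         last2[(sequence[i], sequence[i + 1])] = i
--     pairs = [
--         (sequence[i], sequence[i + 1])
--         for i in range(n - 1)
--         if last2.get((sequence[i], sequence[i + 1]), -1) >= i + 2
--     ]
--
--     triplets = []
--     if n >= 6:
--         last3 = {}
--         for i in range(n - 2):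
--             last3[(sequence[i], sequence[i + 1], sequence[i + 2])] = i
--         triplets = [
--             (sequence[i], sequence[i + 1], sequence[i + 2])
--             for i in range(n - 2)
--             if last3.get((sequence[i], sequence[i + 1], sequence[i + 2]), -1) >= i + 3
--         ]
--
--     return {"pairs": pairs, "triplets": triplets}
-- ===== Notes on version B (the rewrite author's own statement) =====
-- stated objective: faster
-- what changed: Replaces A's quadratic inner rescans with one dict pass recording the last start position of every pair/triplet, then a single comprehension keeps an n-gram iff its last occurrence starts at least gap positions later.
import Mathlib
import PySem

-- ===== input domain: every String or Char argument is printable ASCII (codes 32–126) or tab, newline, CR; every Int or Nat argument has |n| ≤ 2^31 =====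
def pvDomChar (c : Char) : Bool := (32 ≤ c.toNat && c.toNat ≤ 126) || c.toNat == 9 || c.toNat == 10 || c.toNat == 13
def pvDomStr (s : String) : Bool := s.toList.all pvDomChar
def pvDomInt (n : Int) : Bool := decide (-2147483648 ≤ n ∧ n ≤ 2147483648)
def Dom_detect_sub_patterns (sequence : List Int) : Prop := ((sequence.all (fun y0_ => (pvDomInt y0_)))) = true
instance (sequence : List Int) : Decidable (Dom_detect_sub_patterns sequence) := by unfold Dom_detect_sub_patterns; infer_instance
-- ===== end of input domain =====

-- B replaces A's O(n^2) nested rescans with one dict of last start positions per pair/triplet (faster).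

-- ===== PORT A =====
def detect_sub_patterns (sequence : List Int) : List (String × List (List Int)) :=
  let n : Int := sequence.length
  if n < 4 then [("pairs", ([] : List (List Int))), ("triplets", ([] : List (List Int)))]
  else
    let pairs : List (List Int) :=
      (PySem.List.pyRange 0 (n - 1) 1).foldl (fun acc i =>
        let pair := (PySem.List.pyGetD sequence i 0, PySem.List.pyGetD sequence (i + 1) 0)
        if (PySem.List.pyRange (i + 2) (n - 1) 1).any (fun j =>
            PySem.List.pyGetD sequence j 0 == pair.1 && PySem.List.pyGetD sequence (j + 1) 0 == pair.2)
        then acc ++ [[pair.1, pair.2]] else acc) []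
    let triplets : List (List Int) :=
      if 6 ≤ n then
        (PySem.List.pyRange 0 (n - 2) 1).foldl (fun acc i =>
          let t := (PySem.List.pyGetD sequence i 0, PySem.List.pyGetD sequence (i + 1) 0,
                    PySem.List.pyGetD sequence (i + 2) 0)
          if (PySem.List.pyRange (i + 3) (n - 2) 1).any (fun j =>
              PySem.List.pyGetD sequence j 0 == t.1 && PySem.List.pyGetD sequence (j + 1) 0 == t.2.1 &&
              PySem.List.pyGetD sequence (j + 2) 0 == t.2.2)
          then acc ++ [[t.1, t.2.1, t.2.2]] else acc) []
      else []
    [("pairs", pairs), ("triplets", triplets)]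

-- ===== PORT B =====
def detect_sub_patterns_alt (sequence : List Int) : List (String × List (List Int)) :=
  let n : Int := sequence.length
  if n < 4 then [("pairs", ([] : List (List Int))), ("triplets", ([] : List (List Int)))]
  else
    let last2 : PySem.Dict (Int × Int) Int :=
      (PySem.List.pyRange 0 (n - 1) 1).foldl (fun d i =>
        d.insert (PySem.List.pyGetD sequence i 0, PySem.List.pyGetD sequence (i + 1) 0) i)
        PySem.Dict.empty
    let pairs : List (List Int) :=
      ((PySem.List.pyRange 0 (n - 1) 1).filter (fun i =>
        decide (i + 2 ≤ last2.getD (PySem.List.pyGetD sequence i 0, PySem.List.pyGetD sequence (i + 1) 0) (-1)))).map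
        (fun i => [PySem.List.pyGetD sequence i 0, PySem.List.pyGetD sequence (i + 1) 0])
    let triplets : List (List Int) :=
      if 6 ≤ n then
        let last3 : PySem.Dict (Int × Int × Int) Int :=
          (PySem.List.pyRange 0 (n - 2) 1).foldl (fun d i =>
            d.insert (PySem.List.pyGetD sequence i 0, PySem.List.pyGetD sequence (i + 1) 0,
                      PySem.List.pyGetD sequence (i + 2) 0) i)
            PySem.Dict.empty
        ((PySem.List.pyRange 0 (n - 2) 1).filter (fun i =>
          decide (i + 3 ≤ last3.getD (PySem.List.pyGetD sequence i 0, PySem.List.pyGetD sequence (i + 1) 0,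
                                      PySem.List.pyGetD sequence (i + 2) 0) (-1)))).map
          (fun i => [PySem.List.pyGetD sequence i 0, PySem.List.pyGetD sequence (i + 1) 0,
                     PySem.List.pyGetD sequence (i + 2) 0])
      else []
    [("pairs", pairs), ("triplets", triplets)]

-- ===== PRECONDITION & SPEC =====
def Spec_detect_sub_patterns (sequence : List Int) (out : List (String × List (List Int))) : Prop := out = detect_sub_patterns_alt sequence
instance (sequence : List Int) (out : List (String × List (List Int))) : Decidable (Spec_detect_sub_patterns sequence out) := by unfold Spec_detect_sub_patterns; infer_instance

-- ===== CLAIM (what is proved, stated in full; the proofs are below) =====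
def Claim_equal_detect_sub_patterns : Prop := ∀ (sequence : List Int), Dom_detect_sub_patterns sequence → Spec_detect_sub_patterns sequence (detect_sub_patterns sequence)

-- ===== LEMMAS AND PROOFS =====

-- the last-match fold either keeps its start value or returns an element of the list
lemma foldl_if_mem (P : Int → Bool) (js : List Int) (a0 : Int) :
    js.foldl (fun acc j => if P j then j else acc) a0 = a0 ∨
    js.foldl (fun acc j => if P j then j else acc) a0 ∈ js := by
  induction js generalizing a0 with
  | nil => left; rfl
  | cons j js ih =>
    simp only [List.foldl_cons]
    rcases ih (if P j then j else a0) with h | h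
    · rw [h]; by_cases hp : P j <;> simp [hp]
    · right; simp [h]

lemma foldl_if_ge (P : Int → Bool) (lo : Int) (js : List Int) (a0 : Int) (ha : lo ≤ a0)
    (hall : ∀ j ∈ js, lo ≤ j) : lo ≤ js.foldl (fun acc j => if P j then j else acc) a0 := by
  rcases foldl_if_mem P js a0 with h | h
  · rw [h]; exact ha
  · exact hall _ h

lemma any_eq_decide_suffix (P : Int → Bool) (lo : Int) (js : List Int) (a0 : Int) (ha : a0 < lo)
    (hall : ∀ j ∈ js, lo ≤ j) :
    js.any P = decide (lo ≤ js.foldl (fun acc j => if P j then j else acc) a0) := by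
  induction js generalizing a0 with
  | nil => simp only [List.any_nil, List.foldl_nil]; rw [decide_eq_false (by omega)]
  | cons j js ih =>
    simp only [List.any_cons, List.foldl_cons]
    by_cases hp : P j
    · have hj : lo ≤ j := hall j (List.mem_cons_self)
      have : lo ≤ js.foldl (fun acc j => if P j then j else acc) j :=
        foldl_if_ge P lo js j hj (fun x hx => hall x (List.mem_cons_of_mem _ hx))
      simp only [hp, if_true, Bool.true_or]
      rw [decide_eq_true this]
    · rw [Bool.not_eq_true] at hp
      simp only [hp, Bool.false_or, Bool.false_eq_true, if_false]
      exact ih a0 ha (fun x hx => hall x (List.mem_cons_of_mem _ hx))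

-- A's inner rescan over [lo, m) succeeds iff the last matching start in [0, m) is ≥ lo
lemma any_eq_decide_le_foldl (P : Int → Bool) (lo m : Int) (hlo : 0 ≤ lo) :
    (PySem.List.pyRange lo m 1).any P =
    decide (lo ≤ (PySem.List.pyRange 0 m 1).foldl (fun acc j => if P j then j else acc) (-1)) := by
  by_cases hm : m ≤ lo
  · rw [PySem.List.pyRange_one_eq_nil hm]
    have hlt : (PySem.List.pyRange 0 m 1).foldl (fun acc j => if P j then j else acc) (-1) < lo := by
      rcases foldl_if_mem P (PySem.List.pyRange 0 m 1) (-1) with h | h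
      · rw [h]; omega
      · have := (PySem.List.mem_pyRange_one.mp h).2; omega
    simp only [List.any_nil]
    rw [decide_eq_false (by omega)]
  · rw [not_le] at hm
    rw [PySem.List.pyRange_one_append 0 lo m hlo (le_of_lt hm), List.foldl_append]
    have ha1 : (PySem.List.pyRange 0 lo 1).foldl (fun acc j => if P j then j else acc) (-1) < lo := by
      rcases foldl_if_mem P (PySem.List.pyRange 0 lo 1) (-1) with h | h
      · rw [h]; omega
      · exact (PySem.List.mem_pyRange_one.mp h).2
    exact any_eq_decide_suffix P lo _ _ ha1 (fun j hj => (PySem.List.mem_pyRange_one.mp hj).1)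

-- B's dict of last positions, read back as the last-match fold
lemma getD_foldl_insert_key {κ : Type} [BEq κ] [LawfulBEq κ] [DecidableEq κ] (keyAt : Int → κ) (js : List Int)
    (d : PySem.Dict κ Int) (k : κ) (v : Int) :
    (js.foldl (fun d j => d.insert (keyAt j) j) d).getD k v =
    js.foldl (fun acc j => if keyAt j = k then j else acc) (d.getD k v) := by
  induction js generalizing d with
  | nil => rfl
  | cons j js ih =>
    simp only [List.foldl_cons, ih, PySem.Dict.getD_insert]
    have hst : (if k = keyAt j then j else d.getD k v) = (if keyAt j = k then j else d.getD k v) := by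
      by_cases h : keyAt j = k
      · simp [h]
      · rw [if_neg (fun hh => h hh.symm), if_neg h]
    rw [hst]

lemma beq_pair (x y a b : Int) : (x == a && y == b) = decide ((x, y) = (a, b)) := by
  by_cases h1 : x = a <;> by_cases h2 : y = b <;> simp [h1, h2]

lemma beq_triple (x y z a b c : Int) :
    (x == a && y == b && z == c) = decide ((x, y, z) = (a, b, c)) := by
  by_cases h1 : x = a <;> by_cases h2 : y = b <;> by_cases h3 : z = c <;> simp [h1, h2, h3]

-- per start position i: A's rescan test equals B's dict-of-last-positions test
lemma cond_eq {kappa : Type} [BEq kappa] [LawfulBEq kappa] [DecidableEq kappa] (keyAt : Int → kappa) (g m i : Int)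
    (hi : 0 ≤ i) (hg : 0 ≤ g) :
    ((PySem.List.pyRange (i + g) m 1).any (fun j => decide (keyAt j = keyAt i))) =
    decide (i + g ≤ ((PySem.List.pyRange 0 m 1).foldl (fun d j => d.insert (keyAt j) j)
      PySem.Dict.empty).getD (keyAt i) (-1)) := by
  rw [getD_foldl_insert_key, PySem.Dict.getD_empty]
  simpa using any_eq_decide_le_foldl (fun j => decide (keyAt j = keyAt i)) (i + g) m (by omega)

-- ===== VERDICT (by name: the statement is the Claim_ definition above) =====
theorem detect_sub_patterns_spec : Claim_equal_detect_sub_patterns := by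
  intro s _
  unfold Spec_detect_sub_patterns detect_sub_patterns detect_sub_patterns_alt
  by_cases h4 : (s.length : Int) < 4
  · simp only [h4, if_true]
  · simp only [h4, if_false]
    have key2 : ∀ i ∈ PySem.List.pyRange 0 ((s.length : Int) - 1) 1,
        ((PySem.List.pyRange (i + 2) ((s.length : Int) - 1) 1).any (fun j =>
          PySem.List.pyGetD s j 0 == PySem.List.pyGetD s i 0 &&
          PySem.List.pyGetD s (j + 1) 0 == PySem.List.pyGetD s (i + 1) 0)) =
        decide (i + 2 ≤ ((PySem.List.pyRange 0 ((s.length : Int) - 1) 1).foldl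
            (fun d j => d.insert (PySem.List.pyGetD s j 0, PySem.List.pyGetD s (j + 1) 0) j)
            PySem.Dict.empty).getD (PySem.List.pyGetD s i 0, PySem.List.pyGetD s (i + 1) 0) (-1)) := by
      intro i hi
      have hi0 : 0 ≤ i := (PySem.List.mem_pyRange_one.mp hi).1
      have hfun : (fun j => PySem.List.pyGetD s j 0 == PySem.List.pyGetD s i 0 &&
          PySem.List.pyGetD s (j + 1) 0 == PySem.List.pyGetD s (i + 1) 0)
          = (fun j => decide ((fun t => (PySem.List.pyGetD s t 0, PySem.List.pyGetD s (t + 1) 0)) j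
              = (fun t => (PySem.List.pyGetD s t 0, PySem.List.pyGetD s (t + 1) 0)) i)) := by
        funext j; simpa using beq_pair (PySem.List.pyGetD s j 0) (PySem.List.pyGetD s (j + 1) 0)
          (PySem.List.pyGetD s i 0) (PySem.List.pyGetD s (i + 1) 0)
      rw [hfun]
      exact cond_eq (fun t => (PySem.List.pyGetD s t 0, PySem.List.pyGetD s (t + 1) 0))
        2 ((s.length : Int) - 1) i hi0 (by norm_num)
    have key3 : ∀ i ∈ PySem.List.pyRange 0 ((s.length : Int) - 2) 1,
        ((PySem.List.pyRange (i + 3) ((s.length : Int) - 2) 1).any (fun j =>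
          PySem.List.pyGetD s j 0 == PySem.List.pyGetD s i 0 &&
          PySem.List.pyGetD s (j + 1) 0 == PySem.List.pyGetD s (i + 1) 0 &&
          PySem.List.pyGetD s (j + 2) 0 == PySem.List.pyGetD s (i + 2) 0)) =
        decide (i + 3 ≤ ((PySem.List.pyRange 0 ((s.length : Int) - 2) 1).foldl
            (fun d j => d.insert (PySem.List.pyGetD s j 0, PySem.List.pyGetD s (j + 1) 0,
              PySem.List.pyGetD s (j + 2) 0) j)
            PySem.Dict.empty).getD (PySem.List.pyGetD s i 0, PySem.List.pyGetD s (i + 1) 0,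
              PySem.List.pyGetD s (i + 2) 0) (-1)) := by
      intro i hi
      have hi0 : 0 ≤ i := (PySem.List.mem_pyRange_one.mp hi).1
      have hfun : (fun j => PySem.List.pyGetD s j 0 == PySem.List.pyGetD s i 0 &&
          PySem.List.pyGetD s (j + 1) 0 == PySem.List.pyGetD s (i + 1) 0 &&
          PySem.List.pyGetD s (j + 2) 0 == PySem.List.pyGetD s (i + 2) 0)
          = (fun j => decide ((fun t => (PySem.List.pyGetD s t 0, PySem.List.pyGetD s (t + 1) 0,
              PySem.List.pyGetD s (t + 2) 0)) j
              = (fun t => (PySem.List.pyGetD s t 0, PySem.List.pyGetD s (t + 1) 0,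
              PySem.List.pyGetD s (t + 2) 0)) i)) := by
        funext j; simpa using beq_triple (PySem.List.pyGetD s j 0) (PySem.List.pyGetD s (j + 1) 0)
          (PySem.List.pyGetD s (j + 2) 0) (PySem.List.pyGetD s i 0) (PySem.List.pyGetD s (i + 1) 0)
          (PySem.List.pyGetD s (i + 2) 0)
      rw [hfun]
      exact cond_eq (fun t => (PySem.List.pyGetD s t 0, PySem.List.pyGetD s (t + 1) 0,
        PySem.List.pyGetD s (t + 2) 0)) 3 ((s.length : Int) - 2) i hi0 (by norm_num)
    rw [PySem.List.foldl_append_if, List.nil_append, List.filter_congr key2]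
    by_cases h6 : 6 ≤ (s.length : Int)
    · simp only [if_pos h6]
      rw [PySem.List.foldl_append_if, List.nil_append, List.filter_congr key3]
    · simp only [if_neg h6]
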